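-- pv_equiv track=rewrite | github.com/lucasca73/SwiftStaticAnalyzer | swiftcompiler.py | separateSymbol
-- ===== SOURCE A (Python) =====
-- def separateSymbol(symbols, separator):
--     newSymbols = []
--
--     for breaks in symbols:
--         dots = breaks.split(separator)
--         last = 1
--         for d in dots:
--             if d != '':
--                 newSymbols.append(d)
--             if len(dots) > 1 and last < len(dots):
--                 last += 1
--                 newSymbols.append(separator)
--
--     return newSymbols
-- ===== SOURCE B (Python) =====
-- def _tokens(breaks, separator):
--     out = []
--     rest = breaks
--     while True:
--         head, sep, rest = rest.partition(separator)
--         if head != '':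
--             out.append(head)
--         if sep == '':
--             return out
--         out.append(sep)
--
--
-- def separateSymbol(symbols, separator):
--     newSymbols = []
--     for breaks in symbols:
--         newSymbols.extend(_tokens(breaks, separator))
--     return newSymbols
-- ===== Notes on version B (the rewrite author's own statement) =====
-- stated objective: idiomatic
-- what changed: Replaces A's split-then-interleave loop with its bookkeeping counter `last` by a single repeated str.partition scan per string that emits non-empty heads and every separator directly.
-- outside the precondition, e.g. on separateSymbol([], ''): A returns [], B returns []
import Mathlib
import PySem

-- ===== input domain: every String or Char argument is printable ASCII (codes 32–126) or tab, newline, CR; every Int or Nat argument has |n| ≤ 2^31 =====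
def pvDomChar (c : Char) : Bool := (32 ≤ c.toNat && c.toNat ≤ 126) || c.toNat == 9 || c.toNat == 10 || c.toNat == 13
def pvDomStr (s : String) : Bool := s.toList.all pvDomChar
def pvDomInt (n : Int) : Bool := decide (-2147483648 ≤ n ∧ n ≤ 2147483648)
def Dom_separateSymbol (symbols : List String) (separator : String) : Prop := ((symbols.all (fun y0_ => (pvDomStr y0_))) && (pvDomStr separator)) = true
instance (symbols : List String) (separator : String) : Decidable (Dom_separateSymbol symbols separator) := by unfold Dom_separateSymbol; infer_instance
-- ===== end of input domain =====

-- B replaces A's split-then-interleave-with-a-counter by a repeated str.partition scan (idiomatic, same cost).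

-- ===== PORT A =====
-- inner loop of A: for d in dots: append d if non-empty; append separator while last < len(dots)
def pvStep (dots : List String) (separator : String) (st : List String × Int) (d : String) : List String × Int :=
  if dots.length > 1 ∧ st.2 < (dots.length : Int)
  then ((if d ≠ "" then st.1 ++ [d] else st.1) ++ [separator], st.2 + 1)
  else ((if d ≠ "" then st.1 ++ [d] else st.1), st.2)

def pvInner (dots : List String) (separator : String) (newSymbols : List String) : List String :=
  (dots.foldl (pvStep dots separator) (newSymbols, 1)).1

def separateSymbol (symbols : List String) (separator : String) : List String :=
  symbols.foldl (fun newSymbols breaks =>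
    -- breaks.split(separator); none (= ValueError on empty separator) is excluded by Pre_
    pvInner ((PySem.Str.split? breaks separator).getD []) separator newSymbols) []

-- ===== PORT B =====
-- B's while-loop: head, sep, rest = rest.partition(separator); partition = find + take/drop
def pvTokenize (sep : List Char) (rest : List Char) : List (List Char) :=
  if hs : sep = [] then []  -- Python raises ValueError here; excluded by Pre_
  else
    if hi : PySem.Chars.find rest sep = -1 then
      (if rest = [] then [] else [rest])  -- sep == '': append head if non-empty, break
    else
      (if rest.take (PySem.Chars.find rest sep).toNat = [] then []
       else [rest.take (PySem.Chars.find rest sep).toNat]) ++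
      sep :: pvTokenize sep (rest.drop ((PySem.Chars.find rest sep).toNat + sep.length))
termination_by rest.length
decreasing_by
  have h0 : 0 ≤ PySem.Chars.find rest sep := by
    have := PySem.Chars.neg_one_le_find rest sep; omega
  have hin : sep <:+: rest := (PySem.Chars.find_nonneg_iff rest sep).1 h0
  have hle : sep.length ≤ rest.length := hin.length_le
  have hslen : 1 ≤ sep.length := by
    cases sep with
    | nil => exact absurd rfl hs
    | cons a l => simp
  simp only [List.length_drop]; omega

def separateSymbol_alt (symbols : List String) (separator : String) : List String :=
  symbols.flatMap (fun breaks => (pvTokenize separator.toList breaks.toList).map String.ofList)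

-- ===== PRECONDITION & SPEC =====
-- Pre_ excludes separator = "", on which Python's str.split / str.partition raise ValueError for every
-- processed string; when symbols is empty no split runs and both programs still return [] there.
def Pre_separateSymbol (symbols : List String) (separator : String) : Prop := separator ≠ ""
instance (symbols : List String) (separator : String) : Decidable (Pre_separateSymbol symbols separator) := by
  unfold Pre_separateSymbol; infer_instance
def pvWitness_separateSymbol : List String × String := (["a.b", ".x.", ""], ".")

def Spec_separateSymbol (symbols : List String) (separator : String) (out : List String) : Prop := out = separateSymbol_alt symbols separator
instance (symbols : List String) (separator : String) (out : List String) : Decidable (Spec_separateSymbol symbols separator out) := by unfold Spec_separateSymbol; infer_instance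

-- ===== CLAIM (what is proved, stated in full; the proofs are below) =====
def Claim_equal_separateSymbol : Prop := ∀ (symbols : List String) (separator : String), Dom_separateSymbol symbols separator → Pre_separateSymbol symbols separator → Spec_separateSymbol symbols separator (separateSymbol symbols separator)

-- ===== LEMMAS AND PROOFS =====

-- clean accumulator-free form of PySem.Chars.splitOn's fuelled scan
def pvSp (sep : List Char) : List Char → List (List Char)
  | [] => [[]]
  | c :: rest =>
    if sep.isPrefixOf (c :: rest) ∧ sep ≠ [] then [] :: pvSp sep (rest.drop (sep.length - 1))
    else (pvSp sep rest).modifyHead (c :: ·)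
termination_by l => l.length
decreasing_by
  all_goals simp only [List.length_drop, List.length_cons]
  · omega
  · omega

-- piece-joining: emit each non-empty piece, a separator after every piece but the last
def pvInterleave (sep : List Char) : List (List Char) → List (List Char)
  | [] => []
  | [d] => if d = [] then [] else [d]
  | d :: e :: rest => (if d = [] then [] else [d]) ++ sep :: pvInterleave sep (e :: rest)

def pvInterleaveS (sep : String) : List String → List String
  | [] => []
  | [d] => if d = "" then [] else [d]
  | d :: e :: rest => (if d = "" then [] else [d]) ++ sep :: pvInterleaveS sep (e :: rest)

theorem pvSp_ne_nil (sep : List Char) (l : List Char) : pvSp sep l ≠ [] := by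
  induction l using pvSp.induct sep with
  | case1 => simp [pvSp]
  | case2 c rest h ih => rw [pvSp, if_pos h]; simp
  | case3 c rest h ih =>
    rw [pvSp, if_neg h]
    cases h' : pvSp sep rest with
    | nil => exact absurd h' ih
    | cons a t => simp

theorem pv_go_spec (sep : List Char) (hs : sep ≠ []) :
    ∀ (fuel : Nat) (l cur : List Char) (acc : List (List Char)), l.length < fuel →
      PySem.Chars.splitOn.go sep fuel l cur acc
        = acc.reverse ++ (pvSp sep l).modifyHead (cur.reverse ++ ·) := by
  intro fuel
  induction fuel with
  | zero => intro l cur acc h; omega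
  | succ fuel ih =>
    intro l cur acc h
    cases l with
    | nil =>
      rw [PySem.Chars.splitOn.go.eq_def]
      simp [pvSp]
    | cons c rest =>
      rw [PySem.Chars.splitOn.go.eq_def]
      have hslen : 1 ≤ sep.length := List.length_pos_of_ne_nil hs
      by_cases hp : sep.isPrefixOf (c :: rest) = true
      · simp only [hp, if_pos]
        rw [ih _ _ _ (by simp only [List.length_drop]; simp at h ⊢; omega)]
        rw [pvSp, if_pos ⟨hp, hs⟩]
        have hdrop : List.drop sep.length (c :: rest) = rest.drop (sep.length - 1) := by
          cases hsl : sep.length with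
          | zero => omega
          | succ k => simp [List.drop_succ_cons]
        rw [hdrop]
        cases pvSp sep (rest.drop (sep.length - 1)) with
        | nil => simp
        | cons a t => simp
      · simp only [hp, if_neg, Bool.false_eq_true, not_false_iff]
        rw [ih _ _ _ (by simp at h ⊢; omega)]
        rw [pvSp, if_neg (by intro hcon; exact hp hcon.1)]
        cases hspr : pvSp sep rest with
        | nil => exact absurd hspr (pvSp_ne_nil sep rest)
        | cons a t => simp

theorem pv_splitOn_eq (l sep : List Char) (hs : sep ≠ []) :
    PySem.Chars.splitOn l sep = pvSp sep l := by
  unfold PySem.Chars.splitOn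
  rw [pv_go_spec sep hs (l.length + 1) l [] [] (by omega)]
  cases h : pvSp sep l with
  | nil => exact absurd h (pvSp_ne_nil sep l)
  | cons a t => simp

theorem pv_find_eq_of (l sub : List Char) (j : Nat)
    (hj : sub <+: l.drop j) (hmin : ∀ k, k < j → ¬ sub <+: l.drop k) :
    PySem.Chars.find l sub = (j : Int) := by
  have hin : sub <:+: l := hj.isInfix.trans (List.drop_suffix j l).isInfix
  have h0 : 0 ≤ PySem.Chars.find l sub := (PySem.Chars.find_nonneg_iff l sub).2 hin
  obtain ⟨hpf, hm⟩ := PySem.Chars.find_spec (s := l) (sub := sub) h0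
  rcases Nat.lt_trichotomy (PySem.Chars.find l sub).toNat j with h | h | h
  · exact absurd hpf (hmin _ h)
  · omega
  · exact absurd hj (hm j h)

theorem pv_pvSp_no_occ (sep l : List Char) (h : ¬ sep <:+: l) : pvSp sep l = [l] := by
  induction l with
  | nil => simp [pvSp]
  | cons c rest ih =>
    have hnp : ¬ (sep.isPrefixOf (c :: rest) = true ∧ sep ≠ []) := by
      intro ⟨hp, _⟩
      exact h (List.IsPrefix.isInfix (List.isPrefixOf_iff_prefix.1 hp))
    rw [pvSp, if_neg hnp]
    rw [ih (fun hinf => h (hinf.trans (List.suffix_cons c rest).isInfix))]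
    simp [List.modifyHead]

theorem pv_pvSp_find (sep : List Char) (hs : sep ≠ []) :
    ∀ (l : List Char), 0 ≤ PySem.Chars.find l sep →
      pvSp sep l = l.take (PySem.Chars.find l sep).toNat
        :: pvSp sep (l.drop ((PySem.Chars.find l sep).toNat + sep.length)) := by
  intro l
  induction l with
  | nil =>
    intro h0
    have : ¬ sep <:+: ([] : List Char) := by
      intro hinf
      exact hs (List.eq_nil_of_infix_nil hinf)
    rw [(PySem.Chars.find_eq_neg_one_iff [] sep).2 this] at h0
    omega
  | cons c rest ih =>
    intro h0
    obtain ⟨hpf, hm⟩ := PySem.Chars.find_spec (s := c :: rest) (sub := sep) h0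
    have hslen : 1 ≤ sep.length := by
      cases sep with
      | nil => exact absurd rfl hs
      | cons a t => simp
    cases hj : (PySem.Chars.find (c :: rest) sep).toNat with
    | zero =>
      rw [hj] at hpf
      simp only [List.drop_zero] at hpf
      rw [pvSp, if_pos ⟨List.isPrefixOf_iff_prefix.2 hpf, hs⟩]
      have hdrop : List.drop (0 + sep.length) (c :: rest) = rest.drop (sep.length - 1) := by
        cases hsl : sep.length with
        | zero => omega
        | succ k => simp [List.drop_succ_cons]
      rw [hdrop]
      simp
    | succ j =>
      have hnp : ¬ sep <+: (c :: rest) := by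
        have := hm 0 (by omega)
        simpa using this
      rw [pvSp, if_neg (by intro ⟨hp, _⟩; exact hnp (List.isPrefixOf_iff_prefix.1 hp))]
      have hfr : PySem.Chars.find rest sep = (j : Int) := by
        apply pv_find_eq_of
        · rw [hj] at hpf; simpa [List.drop_succ_cons] using hpf
        · intro k hk
          have := hm (k + 1) (by omega)
          simpa [List.drop_succ_cons] using this
      have ihr := ih (by rw [hfr]; omega)
      rw [hfr] at ihr
      simp only [Int.toNat_natCast] at ihr
      rw [ihr]
      simp [List.modifyHead, List.take_succ_cons,
        show j + 1 + sep.length = (j + sep.length) + 1 from by omega, List.drop_succ_cons]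

theorem pv_tokenize_eq (sep : List Char) (hs : sep ≠ []) (l : List Char) :
    pvTokenize sep l = pvInterleave sep (pvSp sep l) := by
  induction l using pvTokenize.induct sep with
  | case1 x h => exact absurd h hs
  | case2 hns hm1 =>
    have hno : ¬ sep <:+: ([] : List Char) := (PySem.Chars.find_eq_neg_one_iff [] sep).1 hm1
    rw [pvTokenize, dif_neg hs, dif_pos hm1, pv_pvSp_no_occ sep [] hno]
    rfl
  | case3 x hns hm1 hxne =>
    have hno : ¬ sep <:+: x := (PySem.Chars.find_eq_neg_one_iff x sep).1 hm1
    rw [pvTokenize, dif_neg hs, dif_pos hm1, pv_pvSp_no_occ sep x hno]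
    simp [pvInterleave, hxne]
  | case4 rest hns hm1 ih =>
    have h0 : 0 ≤ PySem.Chars.find rest sep := by
      have := PySem.Chars.neg_one_le_find rest sep; omega
    rw [pvTokenize]
    rw [dif_neg hs, dif_neg hm1, ih]
    rw [pv_pvSp_find sep hs rest h0]
    cases hsp : pvSp sep (rest.drop ((PySem.Chars.find rest sep).toNat + sep.length)) with
    | nil => exact absurd hsp (pvSp_ne_nil sep _)
    | cons a t => rfl

theorem pv_foldA_gen (dots : List String) (sep : String) :
    ∀ (ds : List String) (acc : List String) (c : Int), 1 ≤ c →
      c + ds.length = (dots.length : Int) + 1 →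
      (ds.foldl (pvStep dots sep) (acc, c)).1 = acc ++ pvInterleaveS sep ds := by
  intro ds
  induction ds with
  | nil => intro acc c _ _; simp [pvInterleaveS]
  | cons d tail ih =>
    intro acc c hc hlen
    cases tail with
    | nil =>
      have hcond : ¬ (dots.length > 1 ∧ c < (dots.length : Int)) := by
        intro ⟨_, hlt⟩
        simp at hlen
        omega
      simp only [List.foldl_cons, List.foldl_nil]
      rw [pvStep, if_neg hcond]

      by_cases hd : d = ""
      · simp [hd, pvInterleaveS]
      · simp [hd, pvInterleaveS]
    | cons e rest =>
      have hcond : dots.length > 1 ∧ c < (dots.length : Int) := by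
        constructor
        · simp at hlen; omega
        · simp at hlen; omega
      have hstep : pvStep dots sep (acc, c) d = ((if d ≠ "" then acc ++ [d] else acc) ++ [sep], c + 1) := by
        rw [pvStep, if_pos hcond]
      rw [List.foldl_cons, hstep]
      rw [ih _ (c + 1) (by omega) (by simp at hlen ⊢; omega)]
      by_cases hd : d = ""
      · simp [hd, pvInterleaveS]
      · simp [hd, pvInterleaveS]

theorem pv_inner_spec (dots : List String) (sep : String) (ns : List String) :
    pvInner dots sep ns = ns ++ pvInterleaveS sep dots := by
  unfold pvInner
  exact pv_foldA_gen dots sep dots ns 1 (by omega) (by omega)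

theorem pv_interleave_map (sep : String) :
    ∀ (ps : List (List Char)),
      (pvInterleave sep.toList ps).map String.ofList = pvInterleaveS sep (ps.map String.ofList) := by
  intro ps
  induction ps with
  | nil => rfl
  | cons d tail ih =>
    cases tail with
    | nil =>
      by_cases hd : d = []
      · simp [hd, pvInterleave, pvInterleaveS]
      · have : String.ofList d ≠ "" := by
          intro hcon
          apply hd
          have := congrArg String.toList hcon
          simpa using this
        simp [pvInterleave, pvInterleaveS, hd, this]
    | cons e rest =>
      by_cases hd : d = []
      · subst hd
        rw [show pvInterleave sep.toList ([] :: e :: rest)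
            = sep.toList :: pvInterleave sep.toList (e :: rest) from by rw [pvInterleave]; simp]
        simp only [List.map_cons, show String.ofList ([] : List Char) = "" from rfl]
        rw [show pvInterleaveS sep ("" :: String.ofList e :: List.map String.ofList rest)
            = sep :: pvInterleaveS sep (String.ofList e :: List.map String.ofList rest) from by
          rw [pvInterleaveS]; simp]
        simp only [List.map_cons] at ih ⊢
        simp [ih, String.ofList_toList]
      · have hne : String.ofList d ≠ "" := by
          intro hcon
          apply hd
          have := congrArg String.toList hcon
          simpa using this
        simp only [pvInterleave, if_neg hd]
        simp only [List.map_cons] at ih ⊢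
        simp only [List.cons_append, List.nil_append, List.map_cons, ih]
        rw [pvInterleaveS, if_neg hne]
        simp [String.ofList_toList]

theorem pv_per_string (breaks sep : String) (hs : sep ≠ "") (ns : List String) :
    pvInner ((PySem.Str.split? breaks sep).getD []) sep ns
      = ns ++ (pvTokenize sep.toList breaks.toList).map String.ofList := by
  have hsc : sep.toList ≠ [] := by
    intro hcon
    apply hs
    have := congrArg String.ofList hcon
    simpa using this
  have hsplit : (PySem.Str.split? breaks sep).getD []
      = (pvSp sep.toList breaks.toList).map String.ofList := by
    have hb := PySem.Str.split?_map breaks sep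
    rw [PySem.Chars.split?] at hb
    rw [if_neg (by simpa using hsc)] at hb
    rw [pv_splitOn_eq _ _ hsc] at hb
    cases hsp : PySem.Str.split? breaks sep with
    | none => rw [hsp] at hb; simp at hb
    | some parts =>
      rw [hsp] at hb
      simp only [Option.map_some, Option.some.injEq] at hb
      simp only [Option.getD_some]
      rw [← hb]
      simp only [List.map_map]
      have : ∀ (xs : List String), xs.map (String.ofList ∘ String.toList) = xs := by
        intro xs
        induction xs with
        | nil => rfl
        | cons x t iht => simp [iht]
      exact (this parts).symm
  rw [hsplit, pv_inner_spec, pv_tokenize_eq sep.toList hsc, pv_interleave_map]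

theorem pv_outer (sep : String) (hs : sep ≠ "") :
    ∀ (syms : List String) (acc : List String),
      syms.foldl (fun newSymbols breaks =>
        pvInner ((PySem.Str.split? breaks sep).getD []) sep newSymbols) acc
      = acc ++ syms.flatMap (fun breaks => (pvTokenize sep.toList breaks.toList).map String.ofList) := by
  intro syms
  induction syms with
  | nil => intro acc; simp
  | cons b t ih =>
    intro acc
    simp only [List.foldl_cons, List.flatMap_cons]
    rw [pv_per_string b sep hs acc, ih]
    simp

-- ===== VERDICT (by name: the statement is the Claim_ definition above) =====
theorem separateSymbol_spec : Claim_equal_separateSymbol := by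
  intro symbols separator _ hpre
  unfold Spec_separateSymbol separateSymbol separateSymbol_alt
  rw [pv_outer separator hpre symbols []]
  simp
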